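-- pv_equiv track=rewrite | github.com/Mukhammed006/labs | lab3/functions1.py | func
-- ===== SOURCE A (Python) =====
-- def func(a):
--     l = len(a)
--     for i in range(l):
--         if a[i]==0:
--             for j in range(i+1, l):
--                 if a[j]==0:
--                     for x in range(j+1, l):
--                          match(a[x]):
--                                case 0: return False
--                                case 7: return True
--     return False
-- ===== SOURCE B (Python) =====
-- def func(a):
--     # Single pass: count zeros seen; once two zeros have appeared,
--     # the first subsequent 0 or 7 decides the answer.
--     zeros = 0
--     for x in a:
--         if zeros >= 2:
--             if x == 7:
--                 return True
--             if x == 0: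
--                 return False
--         elif x == 0:
--             zeros += 1
--     return False
-- ===== Notes on version B (the rewrite author's own statement) =====
-- stated objective: simpler
-- what changed: Replaces the three nested index loops with one linear pass that counts the zeros seen and decides on the first 0-or-7 after the second zero.
import Mathlib
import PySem

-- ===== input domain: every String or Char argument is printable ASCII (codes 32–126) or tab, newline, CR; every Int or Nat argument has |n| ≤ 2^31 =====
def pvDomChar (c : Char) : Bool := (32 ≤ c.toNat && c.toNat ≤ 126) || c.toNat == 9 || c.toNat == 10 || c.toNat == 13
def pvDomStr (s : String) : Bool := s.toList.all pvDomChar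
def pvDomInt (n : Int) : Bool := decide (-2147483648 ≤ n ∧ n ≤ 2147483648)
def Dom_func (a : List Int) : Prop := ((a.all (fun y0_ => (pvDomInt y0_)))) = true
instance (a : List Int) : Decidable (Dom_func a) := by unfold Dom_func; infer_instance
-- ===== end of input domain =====

-- B replaces A's three nested index loops by one linear pass counting zeros; return value only, no side effects.

-- ===== PORT A =====
-- innermost loop: for x in range(x0, l): match a[x]: case 0 -> return False, case 7 -> return True
def loopX (a : List Int) (x : Nat) : Option Bool :=
  if _h : x < a.length then
    if a.getD x 0 == 0 then some false
    else if a.getD x 0 == 7 then some true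
    else loopX a (x + 1)
  else none
termination_by a.length - x

-- middle loop: for j in range(j0, l): if a[j]==0 then run inner loop
def loopJ (a : List Int) (j : Nat) : Option Bool :=
  if _h : j < a.length then
    if a.getD j 0 == 0 then
      match loopX a (j + 1) with
      | some b => some b
      | none => loopJ a (j + 1)
    else loopJ a (j + 1)
  else none
termination_by a.length - j

-- outer loop: for i in range(l): if a[i]==0 then run middle loop
def loopI (a : List Int) (i : Nat) : Option Bool :=
  if _h : i < a.length then
    if a.getD i 0 == 0 then
      match loopJ a (i + 1) with
      | some b => some b
      | none => loopI a (i + 1)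
    else loopI a (i + 1)
  else none
termination_by a.length - i

def func (a : List Int) : Bool := (loopI a 0).getD false

-- ===== PORT B =====
-- single pass, z = number of zeros seen so far
def altGo : List Int → Nat → Bool
  | [], _ => false
  | x :: xs, z =>
    if 2 ≤ z then
      if x == 7 then true
      else if x == 0 then false
      else altGo xs z
    else if x == 0 then altGo xs (z + 1)
    else altGo xs z

def func_alt (a : List Int) : Bool := altGo a 0

-- ===== PRECONDITION & SPEC =====
def Spec_func (a : List Int) (out : Bool) : Prop := out = func_alt a
instance (a : List Int) (out : Bool) : Decidable (Spec_func a out) := by unfold Spec_func; infer_instance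

-- ===== CLAIM (what is proved, stated in full; the proofs are below) =====
def Claim_equal_func : Prop := ∀ (a : List Int), Dom_func a → Spec_func a (func a)

-- ===== LEMMAS AND PROOFS =====

lemma drop_cons_of_lt (a : List Int) (i : Nat) (h : i < a.length) :
    a.drop i = a.getD i 0 :: a.drop (i + 1) := by
  rw [List.drop_eq_getElem_cons h, List.getD_eq_getElem a 0 h]

lemma loopX_none_loopJ_none (a : List Int) (i : Nat) :
    loopX a i = none → loopJ a i = none := by
  fun_induction loopJ a i with
  | case1 j hj h0 b hb =>
      intro h
      rw [loopX, dif_pos hj, if_pos h0] at h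
      exact absurd h (by simp)
  | case2 j hj h0 hb ih =>
      intro h
      rw [loopX, dif_pos hj, if_pos h0] at h
      exact absurd h (by simp)
  | case3 j hj h0 ih =>
      intro h
      rw [loopX, dif_pos hj, if_neg h0] at h
      by_cases h7 : (a.getD j 0 == 7) = true
      · rw [if_pos h7] at h; exact absurd h (by simp)
      · rw [if_neg h7] at h; exact ih h
  | case4 j hj => intro _; rfl

lemma loopJ_none_loopI_none (a : List Int) (i : Nat) :
    loopJ a i = none → loopI a i = none := by
  fun_induction loopI a i with
  | case1 i hi h0 b hb =>
      intro h
      rw [loopJ, dif_pos hi, if_pos h0] at h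
      cases hX : loopX a (i + 1) with
      | some c => rw [hX] at h; exact absurd h (by simp)
      | none =>
          rw [hX] at h
          simp only [] at h
          rw [h] at hb
          exact absurd hb (by simp)
  | case2 i hi h0 hb ih =>
      intro _
      exact ih hb
  | case3 i hi h0 ih =>
      intro h
      rw [loopJ, dif_pos hi, if_neg h0] at h
      exact ih h
  | case4 i hi => intro _; rfl

lemma altGo_two (a : List Int) (i : Nat) :
    altGo (a.drop i) 2 = (loopX a i).getD false := by
  fun_induction loopX a i with
  | case1 x hx h0 =>
      rw [drop_cons_of_lt a x hx]
      simp only [altGo]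
      simp at h0
      simp [h0]
  | case2 x hx h0 h7 =>
      rw [drop_cons_of_lt a x hx]
      simp only [altGo]
      simp at h7
      simp [h7]
  | case3 x hx h0 h7 ih =>
      rw [drop_cons_of_lt a x hx]
      simp only [altGo]
      simp at h0 h7
      simp [h0, h7, ih]
  | case4 x hx =>
      rw [List.drop_eq_nil_of_le (by omega)]
      rfl

lemma altGo_one (a : List Int) (i : Nat) :
    altGo (a.drop i) 1 = (loopJ a i).getD false := by
  fun_induction loopJ a i with
  | case1 j hj h0 b hb =>
      rw [drop_cons_of_lt a j hj]
      simp only [altGo]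
      have h2 := altGo_two a (j + 1)
      rw [hb] at h2
      simp at h0
      simp [h0, h2]
  | case2 j hj h0 hb ih =>
      rw [drop_cons_of_lt a j hj]
      simp only [altGo]
      have h2 := altGo_two a (j + 1)
      rw [hb] at h2
      have hJ : loopJ a (j + 1) = none := loopX_none_loopJ_none a (j + 1) hb
      rw [hJ]
      simp at h0
      simp [h0, h2]
  | case3 j hj h0 ih =>
      rw [drop_cons_of_lt a j hj]
      simp only [altGo]
      simp at h0
      simp [h0, ih]
  | case4 j hj =>
      rw [List.drop_eq_nil_of_le (by omega)]
      rfl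

lemma altGo_zero (a : List Int) (i : Nat) :
    altGo (a.drop i) 0 = (loopI a i).getD false := by
  fun_induction loopI a i with
  | case1 i hi h0 b hb =>
      rw [drop_cons_of_lt a i hi]
      simp only [altGo]
      have h1 := altGo_one a (i + 1)
      rw [hb] at h1
      simp at h0
      simp [h0, h1]
  | case2 i hi h0 hb ih =>
      rw [drop_cons_of_lt a i hi]
      simp only [altGo]
      have h1 := altGo_one a (i + 1)
      rw [hb] at h1
      have hI : loopI a (i + 1) = none := loopJ_none_loopI_none a (i + 1) hb
      rw [hI]
      simp at h0
      simp [h0, h1]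
  | case3 i hi h0 ih =>
      rw [drop_cons_of_lt a i hi]
      simp only [altGo]
      simp at h0
      simp [h0, ih]
  | case4 i hi =>
      rw [List.drop_eq_nil_of_le (by omega)]
      rfl

-- ===== VERDICT (by name: the statement is the Claim_ definition above) =====
theorem func_spec : Claim_equal_func := by
  intro a _
  unfold Spec_func func func_alt
  have h := altGo_zero a 0
  simpa using h.symm
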